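-- pv_equiv track=rewrite | github.com/ihgazni2/dlixhict-didactic | xdict/quote.py | get_lrquotes
-- ===== SOURCE A (Python) =====
-- def get_lrquotes(quotes_pairs_dict):
--     lquotes = []
--     rquotes = []
--     quotes = []
--     for i in range(1,quotes_pairs_dict.__len__()+1):
--         lquotes.append(quotes_pairs_dict[i][0])
--         rquotes.append(quotes_pairs_dict[i][1])
--         quotes.append(quotes_pairs_dict[i][0])
--         quotes.append(quotes_pairs_dict[i][1])
--     return((lquotes,rquotes,quotes))
-- ===== SOURCE B (Python) =====
-- def get_lrquotes(quotes_pairs_dict):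
--     quotes = []
--     for i in range(1, len(quotes_pairs_dict) + 1):
--         quotes.append(quotes_pairs_dict[i][0])
--         quotes.append(quotes_pairs_dict[i][1])
--     return (quotes[0::2], quotes[1::2], quotes)
-- ===== Notes on version B (the rewrite author's own statement) =====
-- stated objective: simpler
-- what changed: The loop maintains only the combined list; the left/right lists are recovered afterwards by stride slices quotes[0::2] and quotes[1::2] instead of being built in the loop.
import Mathlib
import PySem

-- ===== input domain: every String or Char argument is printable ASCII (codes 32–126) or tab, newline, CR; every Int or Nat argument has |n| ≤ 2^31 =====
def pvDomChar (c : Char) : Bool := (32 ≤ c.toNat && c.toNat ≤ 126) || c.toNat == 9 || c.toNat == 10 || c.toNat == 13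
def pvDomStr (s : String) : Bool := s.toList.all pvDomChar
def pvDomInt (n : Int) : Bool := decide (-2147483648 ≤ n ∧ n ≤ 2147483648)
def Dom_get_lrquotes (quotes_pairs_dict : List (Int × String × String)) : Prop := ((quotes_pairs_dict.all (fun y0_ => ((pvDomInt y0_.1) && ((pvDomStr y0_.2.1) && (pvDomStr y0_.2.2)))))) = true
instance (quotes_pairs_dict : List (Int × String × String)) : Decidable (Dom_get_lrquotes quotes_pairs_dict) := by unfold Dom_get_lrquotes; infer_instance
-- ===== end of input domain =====

-- B keeps only the combined list in the loop and recovers the left/right lists by stride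
-- slices afterwards — simpler single-accumulator loop, same return value.

-- ===== PORT A =====
-- d[i] on the Python dict: first-match lookup on the association list; total form used
-- under Pre_ (which demands every looked-up key be present).
def pvLookup (d : List (Int × String × String)) (i : Int) : String × String :=
  ((PySem.Dict.mk d).get? i).getD ("", "")

def get_lrquotes (quotes_pairs_dict : List (Int × String × String)) : List String × List String × List String :=
  (PySem.List.pyRange 1 ((quotes_pairs_dict.length : Int) + 1) 1).foldl
    (fun (acc : List String × List String × List String) i =>
      (acc.1 ++ [(pvLookup quotes_pairs_dict i).1],
       acc.2.1 ++ [(pvLookup quotes_pairs_dict i).2],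
       acc.2.2 ++ [(pvLookup quotes_pairs_dict i).1] ++ [(pvLookup quotes_pairs_dict i).2]))
    ([], [], [])

-- ===== PORT B =====
def get_lrquotes_alt (quotes_pairs_dict : List (Int × String × String)) : List String × List String × List String :=
  let quotes :=
    (PySem.List.pyRange 1 ((quotes_pairs_dict.length : Int) + 1) 1).foldl
      (fun (q : List String) i =>
        q ++ [(pvLookup quotes_pairs_dict i).1] ++ [(pvLookup quotes_pairs_dict i).2]) []
  ((PySem.List.slice? quotes (some 0) none 2).getD [],
   (PySem.List.slice? quotes (some 1) none 2).getD [],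
   quotes)

-- ===== PRECONDITION & SPEC =====
-- Pre_ excludes exactly the inputs on which the Python A raises KeyError: every key
-- 1..len(d) must be present in the dict.
def Pre_get_lrquotes (quotes_pairs_dict : List (Int × String × String)) : Prop :=
  ((PySem.List.pyRange 1 ((quotes_pairs_dict.length : Int) + 1) 1).all
    (fun i => ((PySem.Dict.mk quotes_pairs_dict).get? i).isSome)) = true
instance (quotes_pairs_dict : List (Int × String × String)) : Decidable (Pre_get_lrquotes quotes_pairs_dict) := by unfold Pre_get_lrquotes; infer_instance

def pvWitness_get_lrquotes : (List (Int × String × String)) := [(1, "<", ">"), (2, "(", ")")]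

def Spec_get_lrquotes (quotes_pairs_dict : List (Int × String × String)) (out : List String × List String × List String) : Prop := out = get_lrquotes_alt quotes_pairs_dict
instance (quotes_pairs_dict : List (Int × String × String)) (out : List String × List String × List String) : Decidable (Spec_get_lrquotes quotes_pairs_dict out) := by unfold Spec_get_lrquotes; infer_instance

-- ===== CLAIM (what is proved, stated in full; the proofs are below) =====
def Claim_equal_get_lrquotes : Prop := ∀ (quotes_pairs_dict : List (Int × String × String)), Dom_get_lrquotes quotes_pairs_dict → Pre_get_lrquotes quotes_pairs_dict → Spec_get_lrquotes quotes_pairs_dict (get_lrquotes quotes_pairs_dict)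

-- ===== LEMMAS AND PROOFS =====

-- A's fold, characterised: left/right are maps over the index list, combined is the flatMap.
theorem foldA_eq (d : List (Int × String × String)) (idxs : List Int)
    (acc : List String × List String × List String) :
    idxs.foldl
      (fun (acc : List String × List String × List String) i =>
        (acc.1 ++ [(pvLookup d i).1],
         acc.2.1 ++ [(pvLookup d i).2],
         acc.2.2 ++ [(pvLookup d i).1] ++ [(pvLookup d i).2])) acc
    = (acc.1 ++ idxs.map (fun i => (pvLookup d i).1),
       acc.2.1 ++ idxs.map (fun i => (pvLookup d i).2),
       acc.2.2 ++ idxs.flatMap (fun i => [(pvLookup d i).1, (pvLookup d i).2])) := by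
  induction idxs generalizing acc with
  | nil => simp
  | cons a t ih => rw [List.foldl_cons, ih]; simp

-- B's fold, characterised: combined is the flatMap.
theorem foldB_eq (d : List (Int × String × String)) (idxs : List Int) (acc : List String) :
    idxs.foldl
      (fun (q : List String) i => q ++ [(pvLookup d i).1] ++ [(pvLookup d i).2]) acc
    = acc ++ idxs.flatMap (fun i => [(pvLookup d i).1, (pvLookup d i).2]) := by
  induction idxs generalizing acc with
  | nil => simp
  | cons a t ih => rw [List.foldl_cons, ih]; simp

theorem flat_length {α β : Type} (f g : α → β) (l : List α) :
    (l.flatMap (fun i => [f i, g i])).length = 2 * l.length := by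
  induction l with
  | nil => simp
  | cons a t ih => simp [ih]; omega

theorem flat_get_even {α β : Type} (f g : α → β) (l : List α) (k : Nat) :
    (l.flatMap (fun i => [f i, g i]))[2*k]? = (l[k]?).map f := by
  induction l generalizing k with
  | nil => simp
  | cons a t ih =>
    cases k with
    | zero => simp
    | succ k =>
      have h2 : 2 * (k + 1) = 2 * k + 1 + 1 := by omega
      simp [h2, ih]

theorem flat_get_odd {α β : Type} (f g : α → β) (l : List α) (k : Nat) :
    (l.flatMap (fun i => [f i, g i]))[2*k+1]? = (l[k]?).map g := by
  induction l generalizing k with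
  | nil => simp
  | cons a t ih =>
    cases k with
    | zero => simp
    | succ k =>
      have h2 : 2 * (k + 1) + 1 = 2 * k + 1 + 1 + 1 := by omega
      simp [h2, ih]

theorem filterMap_getElem_map {α β : Type} (f : α → β) (l : List α) :
    List.filterMap (fun k => (l[k]?).map f) (List.range l.length) = l.map f := by
  induction l with
  | nil => simp
  | cons a t ih =>
    rw [List.length_cons, List.range_succ_eq_map, List.filterMap_cons]
    simp only [List.getElem?_cons_zero, Option.map_some, List.filterMap_map]
    have : (fun k => ((a :: t)[k + 1]?).map f) = (fun k => (t[k]?).map f) := by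
      funext k; simp
    simp only [Function.comp_def, List.getElem?_cons_succ]
    rw [ih]; simp

-- stride-slice machinery: q[0::2] / q[1::2] as filterMaps over the index range
theorem slice_even' {β : Type} (q : List β) (n : Nat) (hlen : q.length = 2 * n) :
    PySem.List.slice? q (some 0) none 2 = some (List.filterMap (fun k => q[2*k]?) (List.range n)) := by
  unfold PySem.List.slice? PySem.List.sliceIndices
  simp only [if_neg (by norm_num : ¬ (2:Int) = 0)]
  norm_num
  have hc : (if 0 < q.length then (((q.length : Int) + 2 - 1) / 2).toNat else 0) = n := by
    rw [hlen]; split_ifs with h <;> omega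
  rw [hc]
  apply List.filterMap_congr
  intro x _
  congr 1

theorem slice_odd' {β : Type} (q : List β) (n : Nat) (hlen : q.length = 2 * n) :
    PySem.List.slice? q (some 1) none 2 = some (List.filterMap (fun k => q[2*k+1]?) (List.range n)) := by
  unfold PySem.List.slice? PySem.List.sliceIndices
  simp only [if_neg (by norm_num : ¬ (2:Int) = 0)]
  norm_num
  by_cases hn : n = 0
  · subst hn
    have h0 : q = [] := List.length_eq_zero_iff.mp (by omega)
    subst h0; simp
  · have hmin : min 1 (q.length : Int) = 1 := by omega
    rw [hmin]
    have hc : (if 1 < q.length then (((q.length : Int) - 1 + 2 - 1) / 2).toNat else 0) = n := by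
      rw [hlen]; split_ifs with h <;> omega
    rw [hc]
    apply List.filterMap_congr
    intro x _
    congr 1
    omega

-- the even stride slice of the interleaved list is the map of firsts …
theorem slice_even {α β : Type} (f g : α → β) (l : List α) :
    PySem.List.slice? (l.flatMap (fun i => [f i, g i])) (some 0) none 2 = some (l.map f) := by
  rw [slice_even' _ l.length (flat_length f g l)]
  congr 1
  have h : (fun k => (l.flatMap (fun i => [f i, g i]))[2*k]?) = (fun k => (l[k]?).map f) := by
    funext k; exact flat_get_even f g l k
  rw [h, filterMap_getElem_map]

-- … and the odd one is the map of seconds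
theorem slice_odd {α β : Type} (f g : α → β) (l : List α) :
    PySem.List.slice? (l.flatMap (fun i => [f i, g i])) (some 1) none 2 = some (l.map g) := by
  rw [slice_odd' _ l.length (flat_length f g l)]
  congr 1
  have h : (fun k => (l.flatMap (fun i => [f i, g i]))[2*k+1]?) = (fun k => (l[k]?).map g) := by
    funext k; exact flat_get_odd f g l k
  rw [h, filterMap_getElem_map]

-- ===== VERDICT (by name: the statement is the Claim_ definition above) =====
theorem get_lrquotes_spec : Claim_equal_get_lrquotes := by
  intro d _ _
  unfold Spec_get_lrquotes get_lrquotes get_lrquotes_alt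
  rw [foldA_eq, foldB_eq]
  simp only [List.nil_append]
  rw [slice_even (fun i => (pvLookup d i).1) (fun i => (pvLookup d i).2),
      slice_odd (fun i => (pvLookup d i).1) (fun i => (pvLookup d i).2)]
  rfl
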